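-- pv_equiv track=rewrite | github.com/bssrdf/pyleet | N/NumberofNodesWithValueOne.py | numberofNodes2
-- ===== SOURCE A (Python) =====
-- from typing import List
-- from collections import Counter
--
-- def numberofNodes2(n: int , queries:  List[int]) -> int:
--     def dfs(i):
--         if i > n:
--             return
--         tree[i] ^= 1
--         dfs(i << 1)
--         dfs(i << 1 | 1)
--
--     tree = [0] * (n + 1)
--     cnt = Counter(queries)
--     for i, v in cnt.items():
--         if v & 1:
--             dfs(i)
--     return sum(tree)
-- ===== SOURCE B (Python) =====
-- def numberofNodes2(n, queries):
--     # keep only values flipped an odd number of times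
--     odd = set()
--     for q in queries:
--         if q in odd:
--             odd.discard(q)
--         else:
--             odd.add(q)
--     # a node's final value is the parity of flipped ancestors on its root path
--     total = 0
--     for v in range(1, n + 1):
--         u = v
--         p = 0
--         while u > 0:
--             if u in odd:
--                 p ^= 1
--             u >>= 1
--         total += p
--     return total
-- ===== Notes on version B (the rewrite author's own statement) =====
-- stated objective: alternative
-- what changed: Instead of mutating a tree array by one full subtree DFS per odd-count query, B builds the odd-flip set in one toggle pass and computes each node's value as the parity of odd-flipped ancestors met on a single upward walk, summing the ones.
import Mathlib
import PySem

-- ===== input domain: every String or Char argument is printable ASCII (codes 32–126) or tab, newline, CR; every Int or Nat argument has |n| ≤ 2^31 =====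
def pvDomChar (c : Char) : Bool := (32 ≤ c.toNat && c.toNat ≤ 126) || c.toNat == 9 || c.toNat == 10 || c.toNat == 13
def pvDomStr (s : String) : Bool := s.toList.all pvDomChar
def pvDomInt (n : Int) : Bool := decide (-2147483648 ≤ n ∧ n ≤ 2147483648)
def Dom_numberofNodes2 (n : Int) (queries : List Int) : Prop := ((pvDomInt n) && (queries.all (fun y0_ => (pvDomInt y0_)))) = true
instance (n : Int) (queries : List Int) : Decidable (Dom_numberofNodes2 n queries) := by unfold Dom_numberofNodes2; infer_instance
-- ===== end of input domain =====

-- B replaces A's per-query subtree-flip DFS by one odd-parity set plus a per-node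
-- ancestor walk accumulating flip parity (objective: alternative — one pass over the
-- nodes instead of one subtree DFS per odd-count query).

-- ===== PORT A =====
-- dfs(i): recursion stops when i > n; the fuel argument only makes the recursion
-- structural — with fuel n.toNat + 2 it never runs out on the calls A performs
-- (roots ≥ 1 under Pre_, and the index doubles every level).
def dfsA (n : Int) : Nat → Int → List Int → List Int
  | 0, _, tree => tree
  | fuel + 1, i, tree =>
    if i > n then tree
    else
      -- tree[i] ^= 1 ; indices used are 1 ≤ i ≤ n under Pre_, hence in range
      let tree1 := PySem.List.pySetD tree i (PySem.Int.bxor (PySem.List.pyGetD tree i 0) 1)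
      let tree2 := dfsA n fuel (i <<< (1 : Nat)) tree1
      dfsA n fuel (PySem.Int.bor (i <<< (1 : Nat)) 1) tree2

def numberofNodes2 (n : Int) (queries : List Int) : Int :=
  let tree : List Int := List.replicate (n + 1).toNat 0
  let cnt := PySem.Dict.counter queries
  let tree := cnt.items.foldl
    (fun tree iv => if PySem.Int.band iv.2 1 ≠ 0 then dfsA n (n.toNat + 2) iv.1 tree else tree) tree
  tree.sum

-- ===== PORT B =====
-- odd = set of values seen an odd number of times (toggle per occurrence)
def toggleOdd (queries : List Int) : PySem.Set Int :=
  queries.foldl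
    (fun s q => if PySem.Set.contains s q then PySem.Set.discard s q else PySem.Set.add s q)
    PySem.Set.empty

-- the inner 'while u > 0: p ^= (u in odd); u >>= 1' loop; the fuel argument only makes
-- the loop structural — with fuel u.toNat + 1 it never runs out (u halves every step)
def upWalk (odd : PySem.Set Int) : Nat → Int → Int → Int
  | 0, _, p => p
  | fuel + 1, u, p =>
    if u ≤ 0 then p
    else upWalk odd fuel (u >>> (1 : Nat))
          (if PySem.Set.contains odd u then PySem.Int.bxor p 1 else p)

def numberofNodes2_alt (n : Int) (queries : List Int) : Int :=
  let odd := toggleOdd queries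
  (PySem.List.pyRange 1 (n + 1) 1).foldl (fun total v => total + upWalk odd (v.toNat + 1) v 0) 0

-- ===== PRECONDITION & SPEC =====
-- Pre_ excludes inputs holding an odd-count value q ≤ min 0 n: there dfs(q) passes the
-- i > n guard and A recurses on dfs(0) or on negative indices and raises
-- (RecursionError / IndexError); on every other input A returns normally.
def Pre_numberofNodes2 (n : Int) (queries : List Int) : Prop :=
  ∀ q ∈ queries, q ≤ min 0 n → queries.count q % 2 = 0
instance (n : Int) (queries : List Int) : Decidable (Pre_numberofNodes2 n queries) := by
  unfold Pre_numberofNodes2; infer_instance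
def pvWitness_numberofNodes2 : Int × List Int := (3, [1, 2, 1, 1])

def Spec_numberofNodes2 (n : Int) (queries : List Int) (out : Int) : Prop := out = numberofNodes2_alt n queries
instance (n : Int) (queries : List Int) (out : Int) : Decidable (Spec_numberofNodes2 n queries out) := by unfold Spec_numberofNodes2; infer_instance

-- ===== CLAIM (what is proved, stated in full; the proofs are below) =====
def Claim_equal_numberofNodes2 : Prop := ∀ (n : Int) (queries : List Int), Dom_numberofNodes2 n queries → Pre_numberofNodes2 n queries → Spec_numberofNodes2 n queries (numberofNodes2 n queries)

-- ===== LEMMAS AND PROOFS =====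

-- subT i j: node j lies in the subtree rooted at i (parent of j is j / 2)
def subT (i j : Nat) : Bool :=
  if j < i then false
  else if j = i then true
  else subT i (j / 2)
  termination_by j
  decreasing_by omega

lemma subT_of_lt {i j : Nat} (h : j < i) : subT i j = false := by
  rw [subT]; simp [h]

lemma subT_self (i : Nat) : subT i i = true := by
  rw [subT]; simp

lemma subT_step {i j : Nat} (h : j ≠ i) : subT i j = subT i (j / 2) := by
  rcases lt_or_ge j i with hlt | hge
  · rw [subT_of_lt hlt, subT_of_lt (by omega)]
  · rw [subT]
    have : ¬ j < i := by omega
    simp [this, h]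

lemma subT_child_or {i : Nat} (hi : 1 ≤ i) :
    ∀ j, subT i j = (decide (j = i) || subT (2 * i) j || subT (2 * i + 1) j) := by
  intro j
  induction j using Nat.strong_induction_on with
  | _ j IH =>
    by_cases h0 : j = i
    · subst h0
      simp [subT_self, subT_of_lt (show j < 2 * j by omega),
            subT_of_lt (show j < 2 * j + 1 by omega)]
    · by_cases h1 : j < i
      · simp [subT_of_lt h1, subT_of_lt (show j < 2 * i by omega),
              subT_of_lt (show j < 2 * i + 1 by omega), h0]
      · by_cases h2 : j < 2 * i
        · rw [subT_step h0, subT_of_lt (show j / 2 < i by omega)]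
          simp [subT_of_lt h2, subT_of_lt (show j < 2 * i + 1 by omega), h0]
        · by_cases h3 : j = 2 * i
          · subst h3
            rw [subT_step h0]
            have : 2 * i / 2 = i := by omega
            rw [this, subT_self, subT_self]
            simp
          · by_cases h4 : j = 2 * i + 1
            · subst h4
              rw [subT_step h0]
              have : (2 * i + 1) / 2 = i := by omega
              rw [this, subT_self, subT_self]
              simp
            · have h5 : 2 * i + 2 ≤ j := by omega
              rw [subT_step h0, subT_step h3, subT_step h4,
                  IH (j / 2) (by omega)]
              have : ¬ (j / 2 = i) := by omega
              simp [this, h0]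

lemma subT_sib_disj {i : Nat} (hi : 1 ≤ i) :
    ∀ j, ¬(subT (2 * i) j = true ∧ subT (2 * i + 1) j = true) := by
  intro j
  induction j using Nat.strong_induction_on with
  | _ j IH =>
    by_cases h1 : j < 2 * i
    · simp [subT_of_lt h1]
    · by_cases h2 : j = 2 * i
      · rw [h2]
        simp [subT_of_lt (show 2 * i < 2 * i + 1 by omega)]
      · by_cases h3 : j = 2 * i + 1
        · subst h3
          rw [subT_step (show 2 * i + 1 ≠ 2 * i by omega)]
          have : (2 * i + 1) / 2 = i := by omega
          rw [this, subT_of_lt (show i < 2 * i by omega)]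
          simp
        · rw [subT_step h2, subT_step h3]
          exact IH (j / 2) (by omega)

lemma getD_set_char (l : List Int) (i j : Nat) (v : Int) (h : i < l.length) :
    (l.set i v).getD j 0 = if j = i then v else l.getD j 0 := by
  by_cases hj : j = i <;> simp [hj, List.getD]
  · rw [List.getElem?_set_self] <;> simp [h]
  · rw [List.getElem?_set_ne (by omega)]

lemma cast_shl_one (i : Nat) : ((i : Int) <<< (1 : Nat)) = ((2 * i : Nat) : Int) := by
  have : ((i : Int) <<< (1 : Nat)) = (i : Int) * 2 := by simp [Int.shiftLeft_eq]
  omega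

lemma cast_bor_one (i : Nat) :
    PySem.Int.bor ((2 * i : Nat) : Int) 1 = ((2 * i + 1 : Nat) : Int) := by
  have h1 : PySem.Int.bor ((2 * i : Nat) : Int) ((1 : Nat) : Int) = (((2 * i) ||| 1 : Nat) : Int) :=
    PySem.Int.bor_natCast (2 * i) 1
  have h2 : (2 * i) ||| 1 = 2 * i + 1 := by
    rcases Nat.eq_zero_or_pos i with h | h
    · simp [h]
    · show Nat.lor (2 * i) 1 = 2 * i + 1
      rw [Nat.lor, Nat.bitwise]
      have hz : ¬ (2 * i = 0) := by omega
      simp [hz, Nat.mul_mod_right, Nat.mul_div_cancel_left _ (by norm_num : 0 < 2)]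
      omega
  simpa [h2] using h1

-- effect of one dfs call: flips exactly the positions in the subtree of i
lemma dfs_char (n : Int) (hn : 0 ≤ n) :
    ∀ (fuel : Nat) (i : Nat) (tree : List Int), 1 ≤ i → n.toNat < i * 2 ^ fuel →
      tree.length = n.toNat + 1 →
      (dfsA n fuel (↑i) tree).length = n.toNat + 1 ∧
      ∀ j < n.toNat + 1, (dfsA n fuel (↑i) tree).getD j 0 =
        if subT i j then PySem.Int.bxor (tree.getD j 0) 1 else tree.getD j 0 := by
  have hcast : n = ((n.toNat : Nat) : Int) := (Int.toNat_of_nonneg hn).symm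
  intro fuel
  induction fuel with
  | zero =>
    intro i tree hi hfu hlen
    rw [dfsA]
    refine ⟨hlen, ?_⟩
    intro j hj
    have hji : j < i := by simp at hfu; omega
    rw [subT_of_lt hji]
    simp
  | succ fuel IH =>
    intro i tree hi hfu hlen
    by_cases hgt : (↑i : Int) > n
    · have hgtN : n.toNat < i := by omega
      rw [dfsA]
      simp only [if_pos hgt]
      refine ⟨hlen, ?_⟩
      intro j hj
      rw [subT_of_lt (show j < i by omega)]
      simp
    · have hleN : i ≤ n.toNat := by omega
      rw [dfsA]
      simp only [if_neg hgt]
      simp only [PySem.List.pySetD_natCast, PySem.List.pyGetD_natCast, cast_shl_one, cast_bor_one]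
      set T1 := tree.set i (PySem.Int.bxor (tree.getD i 0) 1) with hT1def
      have hlen1 : T1.length = n.toNat + 1 := by simp [hT1def, hlen]
      have hstep : i * 2 ^ (fuel + 1) = 2 * i * 2 ^ fuel := by ring
      rw [hstep] at hfu
      have hf3 : n.toNat < (2 * i + 1) * 2 ^ fuel := by
        have := Nat.mul_le_mul_right (2 ^ fuel) (show 2 * i ≤ 2 * i + 1 by omega)
        omega
      obtain ⟨hL2, hV2⟩ := IH (2 * i) T1 (by omega) hfu hlen1
      obtain ⟨hL3, hV3⟩ := IH (2 * i + 1) (dfsA n fuel (↑(2 * i)) T1) (by omega) hf3 hL2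
      refine ⟨hL3, ?_⟩
      intro j hj
      have hT1 : ∀ j' , T1.getD j' 0 = if j' = i then PySem.Int.bxor (tree.getD i 0) 1 else tree.getD j' 0 := by
        intro j'
        exact getD_set_char tree i j' _ (by omega)
      simp only [List.getD_eq_getElem?_getD] at hT1
      rw [hV3 j hj, hV2 j hj, subT_child_or hi j]
      by_cases h0 : j = i
      · subst h0
        rw [subT_of_lt (show j < 2 * j by omega), subT_of_lt (show j < 2 * j + 1 by omega)]
        have hx := hT1 j
        simp only [if_pos rfl] at hx
        simp [subT_self, List.getD_eq_getElem?_getD, hx]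
      · by_cases h2 : subT (2 * i) j = true
        · have h3 : subT (2 * i + 1) j = false := by
            rcases Bool.eq_false_or_eq_true (subT (2 * i + 1) j) with h | h
            · exact absurd ⟨h2, h⟩ (subT_sib_disj hi j)
            · exact h
          simp [h0, h2, h3, List.getD_eq_getElem?_getD, hT1]
        · by_cases h3 : subT (2 * i + 1) j = true
          · simp only [Bool.not_eq_true] at h2
            simp [h0, h2, h3, List.getD_eq_getElem?_getD, hT1]
          · simp only [Bool.not_eq_true] at h2 h3
            simp [h0, h2, h3, List.getD_eq_getElem?_getD, hT1]


lemma flip_case (sb : Bool) (cnt : Nat) (t : Int) (ht : t = 0 ∨ t = 1) :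
    (if Bool.xor (decide (Odd cnt)) ((if sb = true then PySem.Int.bxor t 1 else t) == 1) then (1:Int) else 0)
      = if Bool.xor (decide (Odd (cnt + if sb = true then 1 else 0))) (t == 1) then 1 else 0 := by
  rcases ht with rfl | rfl <;> cases sb <;> by_cases ho : Odd cnt <;>
    simp [ho, Nat.odd_add_one] <;> decide

-- folding dfs over a list of positive roots: entry j ends 0/1 by parity of covering subtrees
lemma fold_dfs_char (n : Int) (hn : 0 ≤ n) :
    ∀ (ks : List Int) (tree : List Int), (∀ k ∈ ks, 1 ≤ k) →
      tree.length = n.toNat + 1 →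
      (∀ j < n.toNat + 1, tree.getD j 0 = 0 ∨ tree.getD j 0 = 1) →
      (ks.foldl (fun t k => dfsA n (n.toNat + 2) k t) tree).length = n.toNat + 1 ∧
      ∀ j < n.toNat + 1,
        (ks.foldl (fun t k => dfsA n (n.toNat + 2) k t) tree).getD j 0 =
          if Bool.xor (decide (Odd (ks.countP (fun k => subT k.toNat j)))) (tree.getD j 0 == 1)
          then 1 else 0 := by
  intro ks
  induction ks with
  | nil =>
    intro tree hpos hlen hbin
    refine ⟨hlen, ?_⟩
    intro j hj
    simp only [List.countP_nil, List.foldl_nil]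
    rcases hbin j hj with h | h <;> rw [h] <;> simp [Nat.odd_iff]
  | cons k ks IHk =>
    intro tree hpos hlen hbin
    simp only [List.foldl_cons]
    have hk1 : 1 ≤ k := hpos k (by simp)
    have hkeq : k = ((k.toNat : Nat) : Int) := by omega
    have hfuel : n.toNat < k.toNat * 2 ^ (n.toNat + 2) := by
      have h1 : n.toNat < 2 ^ (n.toNat + 2) := by
        have h2 := Nat.lt_two_pow_self (n := n.toNat)
        have h3 := Nat.pow_le_pow_right (by norm_num : 1 ≤ 2) (show n.toNat ≤ n.toNat + 2 by omega)
        omega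
      have h2 : 1 ≤ k.toNat := by omega
      nlinarith
    rw [hkeq]
    obtain ⟨hL1, hV1⟩ := dfs_char n hn (n.toNat + 2) k.toNat tree (by omega) hfuel hlen
    have hbin1 : ∀ j < n.toNat + 1,
        (dfsA n (n.toNat + 2) (↑k.toNat) tree).getD j 0 = 0 ∨
        (dfsA n (n.toNat + 2) (↑k.toNat) tree).getD j 0 = 1 := by
      intro j hj
      rw [hV1 j hj]
      by_cases hs : subT k.toNat j = true
      · rw [if_pos hs]
        rcases hbin j hj with h | h <;> rw [h] <;> decide
      · rw [if_neg hs]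
        exact hbin j hj
    obtain ⟨hL2, hV2⟩ := IHk (dfsA n (n.toNat + 2) (↑k.toNat) tree)
      (fun k' hk' => hpos k' (by simp [hk'])) hL1 hbin1
    refine ⟨hL2, ?_⟩
    intro j hj
    rw [hV2 j hj, hV1 j hj, List.countP_cons]
    simp only [Int.toNat_natCast]
    exact flip_case (subT k.toNat j) _ _ (hbin j hj)

-- path parity: pChain s j = parity of elements of s on the root path of j
def pChain (s : List Int) (j : Nat) : Bool :=
  if j = 0 then false
  else Bool.xor (decide ((j : Int) ∈ s)) (pChain s (j / 2))
  termination_by j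
  decreasing_by omega

lemma pChain_zero (s : List Int) : pChain s 0 = false := by rw [pChain]; simp

lemma pChain_congr (s t : List Int) (hst : ∀ x : Int, x ∈ s ↔ x ∈ t) :
    ∀ j, pChain s j = pChain t j := by
  intro j
  induction j using Nat.strong_induction_on with
  | _ j IH =>
    rcases Nat.eq_zero_or_pos j with h0 | h1
    · subst h0; simp [pChain_zero]
    · conv_lhs => rw [pChain]
      conv_rhs => rw [pChain]
      simp only [if_neg (show ¬ j = 0 by omega)]
      rw [IH (j / 2) (by omega)]
      congr 1
      simp [hst]

lemma countP_or_disjoint {α : Type} (p q : α → Bool) :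
    ∀ (l : List α), (∀ x ∈ l, ¬(p x = true ∧ q x = true)) →
      l.countP (fun x => p x || q x) = l.countP p + l.countP q := by
  intro l
  induction l with
  | nil => intro _; simp
  | cons a t IH =>
    intro h
    have ha := h a (by simp)
    rw [List.countP_cons, List.countP_cons, List.countP_cons,
        IH (fun x hx => h x (by simp [hx]))]
    by_cases hp : p a = true <;> by_cases hq : q a = true
    · exact absurd ⟨hp, hq⟩ ha
    · simp [hp, hq]; omega
    · simp [hp, hq]; omega
    · simp [hp, hq]

lemma odd_countP_pChain (K : List Int) (hK : K.Nodup) (hpos : ∀ k ∈ K, 1 ≤ k) :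
    ∀ j, (Odd (K.countP (fun k => subT k.toNat j)) ↔ pChain K j = true) := by
  intro j
  induction j using Nat.strong_induction_on with
  | _ j IH =>
    rcases Nat.eq_zero_or_pos j with h0 | h1
    · subst h0
      have hz : K.countP (fun k => subT k.toNat 0) = 0 := by
        rw [List.countP_eq_zero]
        intro k hk
        simp [subT_of_lt (show 0 < k.toNat by have := hpos k hk; omega)]
      simp [hz, pChain_zero]
    · have hpt : ∀ k ∈ K, (subT k.toNat j = true ↔
          (decide (k = (j : Int)) || subT k.toNat (j / 2)) = true) := by
        intro k hk
        by_cases hkj : k = (j : Int)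
        · subst hkj
          simp [Int.toNat_natCast, subT_self, subT_of_lt (show j / 2 < j by omega)]
        · have hne : j ≠ k.toNat := by
            have := hpos k hk; intro hcc; apply hkj; omega
          rw [subT_step hne]
          simp [hkj]
      rw [List.countP_congr hpt,
          countP_or_disjoint (fun k => decide (k = (j : Int))) (fun k => subT k.toNat (j / 2)) K ?hdisj]
      case hdisj =>
        intro k hk hd
        obtain ⟨hd1, hd2⟩ := hd
        simp only at hd1 hd2
        have hkj : k = (j : Int) := by simpa using hd1
        subst hkj
        rw [Int.toNat_natCast] at hd2
        rw [subT_of_lt (show j / 2 < j by omega)] at hd2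
        exact absurd hd2 (by simp)
      have hcnt : K.countP (fun k => decide (k = (j : Int))) = if (j : Int) ∈ K then 1 else 0 := by
        have : K.countP (fun k => decide (k = (j : Int))) = K.count ((j : Int)) := by
          rw [List.count_eq_countP]
          exact List.countP_congr (by intro x hx; simp)
        rw [this]
        split
        · exact List.count_eq_one_of_mem hK (by assumption)
        · exact List.count_eq_zero.mpr (by assumption)
      have hIH := IH (j / 2) (by omega)
      rw [pChain]
      simp only [if_neg (show ¬ j = 0 by omega)]
      by_cases hm : ((j : Int)) ∈ K <;> by_cases hp : pChain K (j / 2) = true <;>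
        simp [hm, hp, hcnt, Nat.odd_iff] at hIH ⊢ <;> omega

-- membership in the toggle-fold set = odd number of occurrences so far
lemma toggle_mem :
    ∀ (l : List Int) (s : PySem.Set Int), s.Nodup →
      (l.foldl (fun s q => if PySem.Set.contains s q then PySem.Set.discard s q else PySem.Set.add s q) s).Nodup ∧
      ∀ x : Int,
        x ∈ l.foldl (fun s q => if PySem.Set.contains s q then PySem.Set.discard s q else PySem.Set.add s q) s ↔
        ((x ∈ s) ↔ l.count x % 2 = 0) := by
  intro l
  induction l with
  | nil =>
    intro s hs
    refine ⟨hs, ?_⟩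
    intro x
    simp
  | cons q t IH =>
    intro s hs
    simp only [List.foldl_cons]
    by_cases hq : PySem.Set.contains s q = true
    · rw [if_pos hq]
      have hqs : q ∈ s := (PySem.Set.contains_iff s q).mp hq
      obtain ⟨hn2, hm2⟩ := IH (PySem.Set.discard s q) (PySem.Set.nodup_discard s q hs)
      refine ⟨hn2, ?_⟩
      intro x
      rw [hm2 x, PySem.Set.mem_discard]
      by_cases hx : x = q
      · subst hx
        simp [hqs, List.count_cons]
        omega
      · simp [hx, List.count_cons, Ne.symm hx]
    · rw [if_neg hq]
      have hqs : q ∉ s := fun hmem => hq ((PySem.Set.contains_iff s q).mpr hmem)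
      obtain ⟨hn2, hm2⟩ := IH (PySem.Set.add s q) (PySem.Set.nodup_add s q hs)
      refine ⟨hn2, ?_⟩
      intro x
      rw [hm2 x, PySem.Set.mem_add]
      by_cases hx : x = q
      · subst hx
        simp [hqs, List.count_cons]
        omega
      · simp [hx, List.count_cons, Ne.symm hx]

-- B's inner loop computes the path parity
lemma upWalk_char (odd : List Int) :
    ∀ (fuel : Nat) (j : Nat) (p : Int), j < 2 ^ fuel → (p = 0 ∨ p = 1) →
      upWalk odd fuel ((j : Nat) : Int) p =
        if Bool.xor (pChain odd j) (p == 1) then 1 else 0 := by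
  intro fuel
  induction fuel with
  | zero =>
    intro j p hj hp
    have h0 : j = 0 := by omega
    subst h0
    rw [upWalk, pChain_zero]
    rcases hp with rfl | rfl <;> decide
  | succ fuel IH =>
    intro j p hj hp
    rcases Nat.eq_zero_or_pos j with h0 | h1
    · subst h0
      rw [upWalk]
      simp only [Nat.cast_zero, if_pos (le_refl (0 : Int)), pChain_zero]
      rcases hp with rfl | rfl <;> decide
    · rw [upWalk]
      have hneg : ¬ ((j : Int) ≤ 0) := by omega
      rw [if_neg hneg]
      have hsh : ((j : Int) >>> (1 : Nat)) = ((j / 2 : Nat) : Int) := by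
        rw [Int.shiftRight_eq_div_pow]
        omega
      have hhalf : j / 2 < 2 ^ fuel := by
        have : 2 ^ (fuel + 1) = 2 * 2 ^ fuel := by ring
        omega
      rw [hsh]
      have hstepP : pChain odd j = Bool.xor (decide ((j : Int) ∈ odd)) (pChain odd (j / 2)) := by
        conv_lhs => rw [pChain]
        simp [show ¬ j = 0 by omega]
      by_cases hm : ((j : Int)) ∈ odd
      · rw [if_pos ((PySem.Set.contains_iff odd _).mpr hm)]
        have hp' : PySem.Int.bxor p 1 = 0 ∨ PySem.Int.bxor p 1 = 1 := by
          rcases hp with rfl | rfl <;> decide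
        rw [IH (j / 2) _ hhalf hp', hstepP]
        by_cases hc : pChain odd (j / 2) = true <;> rcases hp with rfl | rfl <;>
          simp [hm, hc] <;> decide
      · rw [if_neg (fun hcc => hm ((PySem.Set.contains_iff odd _).mp hcc))]
        rw [IH (j / 2) _ hhalf hp, hstepP]
        by_cases hc : pChain odd (j / 2) = true <;> rcases hp with rfl | rfl <;>
          simp [hm, hc] <;> decide

-- a list whose entries are given by g sums like the table of g
lemma sum_eq_range_getD :
    ∀ (l : List Int) (g : Nat → Int), (∀ j < l.length, l.getD j 0 = g j) →
      l.sum = ((List.range l.length).map g).sum := by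
  intro l
  induction l with
  | nil => intro g _; simp
  | cons a t IH =>
    intro g hg
    have h0 : a = g 0 := by simpa using hg 0 (by simp)
    have ht : ∀ j < t.length, t.getD j 0 = g (j + 1) := by
      intro j hj
      simpa using hg (j + 1) (by simpa using hj)
    have := IH (fun j => g (j + 1)) ht
    simp only [List.sum_cons, List.length_cons, List.range_succ_eq_map, List.map_cons,
      List.map_map, List.sum_cons, this]
    rw [h0]
    congr 1

-- range(1, N+1) as a mapped Nat range
lemma pyRange_one_shift (N : Nat) :
    PySem.List.pyRange 1 ((N : Int) + 1) = (List.range N).map (fun j => ((j + 1 : Nat) : Int)) := by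
  induction N with
  | zero => simpa using PySem.List.pyRange_one_eq_nil (a := 1) (b := 1) (by norm_num)
  | succ N IH =>
    have hcast : (((N + 1 : Nat) : Int) + 1) = ((N : Int) + 1) + 1 := by push_cast; ring
    rw [hcast, PySem.List.pyRange_one_succ_right (by omega), IH, List.range_succ,
      List.map_append]
    simp

-- dfs on the empty tree leaves it empty, so the whole fold does too (n < 0 case)
lemma dfsA_nil (n : Int) : ∀ (fuel : Nat) (k : Int), dfsA n fuel k [] = [] := by
  intro fuel
  induction fuel with
  | zero => intro k; rfl
  | succ fuel IH =>
    intro k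
    rw [dfsA]
    by_cases h : k > n
    · rw [if_pos h]
    · rw [if_neg h]
      simp only [PySem.List.pySetD, PySem.List.pySet?]
      rcases hcase : PySem.List.pyIdx? 0 k with _ | v <;> simp [hcase, IH]

lemma fold_dfs_nil (n : Int) :
    ∀ ks : List Int, ks.foldl (fun t k => dfsA n (n.toNat + 2) k t) [] = [] := by
  intro ks
  induction ks with
  | nil => rfl
  | cons k t IH =>
    simp only [List.foldl_cons]
    rw [dfsA_nil]
    exact IH

lemma foldl_if_filter {α β : Type} (P : α → Prop) [DecidablePred P] (f : α → β → β) :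
    ∀ (l : List α) (t : β),
      l.foldl (fun t x => if P x then f x t else t) t
        = (l.filter (fun x => decide (P x))).foldl (fun t x => f x t) t := by
  intro l
  induction l with
  | nil => intro t; rfl
  | cons a t IH =>
    intro t0
    by_cases h : P a <;> simp [h, IH]

-- ===== VERDICT (by name: the statement is the Claim_ definition above) =====
theorem numberofNodes2_spec : Claim_equal_numberofNodes2 := by
  intro n queries hdom hpre
  unfold Spec_numberofNodes2 numberofNodes2 numberofNodes2_alt
  simp only [PySem.Dict.items_counter, List.foldl_map]
  have hfold : ∀ (l : List Int) (t : List Int),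
      l.foldl (fun tree k =>
        if PySem.Int.band ((queries.count k : Nat) : Int) 1 ≠ 0
        then dfsA n (n.toNat + 2) k tree else tree) t
      = l.foldl (fun tree k =>
        if queries.count k % 2 = 1 then dfsA n (n.toNat + 2) k tree else tree) t := by
    intro l
    induction l with
    | nil => intro t; rfl
    | cons a l IH =>
      intro t
      simp only [List.foldl_cons]
      rw [IH]
      congr 1
      have hiff : (PySem.Int.band ((queries.count a : Nat) : Int) 1 ≠ 0) ↔
          (queries.count a % 2 = 1) := by
        rw [PySem.Int.band_one, PySem.Int.mod_eq_emod_of_pos (by norm_num)]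
        omega
      exact if_congr hiff rfl rfl
  rw [hfold, foldl_if_filter (fun k => queries.count k % 2 = 1)
    (fun k t => dfsA n (n.toNat + 2) k t)]
  set K := (PySem.Set.ofList queries).filter (fun k => decide (queries.count k % 2 = 1)) with hKdef
  have hKnodup : K.Nodup := (PySem.Set.nodup_ofList queries).filter _
  have hKodd : ∀ x : Int, x ∈ K ↔ x ∈ toggleOdd queries := by
    intro x
    obtain ⟨_, htog⟩ := toggle_mem queries PySem.Set.empty (by simp [PySem.Set.empty])
    unfold toggleOdd
    rw [htog x]
    rw [hKdef, List.mem_filter]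
    simp only [PySem.Set.empty, List.not_mem_nil, false_iff, decide_eq_true_eq,
      PySem.Set.mem_ofList]
    constructor
    · intro ⟨_, h2⟩; omega
    · intro h
      have hcnt1 : queries.count x % 2 = 1 := by omega
      have : 0 < queries.count x := by omega
      exact ⟨List.count_pos_iff.mp this, hcnt1⟩
  rcases lt_or_ge n 0 with hneg | hn
  · -- n < 0 : both sides are 0
    rw [show (n + 1).toNat = 0 by omega]
    simp only [List.replicate_zero]
    rw [fold_dfs_nil n K]
    rw [PySem.List.pyRange_one_eq_nil (by omega : n + 1 ≤ 1)]
    rfl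
  · -- 0 ≤ n
    have hKpos : ∀ k ∈ K, 1 ≤ k := by
      intro k hk
      rw [hKdef, List.mem_filter] at hk
      obtain ⟨hk1, hk2⟩ := hk
      have hkq : k ∈ queries := (PySem.Set.mem_ofList queries k).mp hk1
      by_contra hcc
      have := hpre k hkq (by omega)
      simp at hk2
      omega
    have hN1 : (n + 1).toNat = n.toNat + 1 := by omega
    rw [hN1]
    have hbin0 : ∀ j < n.toNat + 1,
        (List.replicate (n.toNat + 1) (0 : Int)).getD j 0 = 0 ∨
        (List.replicate (n.toNat + 1) (0 : Int)).getD j 0 = 1 := by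
      intro j hj
      left
      exact List.getD_replicate 0 hj
    obtain ⟨hLf, hVf⟩ := fold_dfs_char n hn K (List.replicate (n.toNat + 1) 0) hKpos
      (by simp) hbin0
    set res := K.foldl (fun t k => dfsA n (n.toNat + 2) k t) (List.replicate (n.toNat + 1) 0)
      with hresdef
    have hg : ∀ j < res.length, res.getD j 0 =
        (fun j => if pChain (toggleOdd queries) j = true then (1 : Int) else 0) j := by
      intro j hj
      rw [hLf] at hj
      rw [hVf j hj, List.getD_replicate 0 hj]
      have h1 := odd_countP_pChain K hKnodup hKpos j
      have h2 := pChain_congr K (toggleOdd queries) hKodd j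
      by_cases hc : pChain (toggleOdd queries) j = true
      · have hco : Odd (K.countP (fun k => subT k.toNat j)) := h1.mpr (by rw [h2]; exact hc)
        simp [hco, hc]
      · have hco : ¬ Odd (K.countP (fun k => subT k.toNat j)) := by
          intro ho
          exact hc (by rw [← h2]; exact h1.mp ho)
        simp [hco, hc]
    rw [sum_eq_range_getD res _ hg, hLf]
    -- B side
    rw [show n + 1 = ((n.toNat : Nat) : Int) + 1 by omega, pyRange_one_shift n.toNat,
      PySem.List.foldl_add, List.map_map]
    rw [List.range_succ_eq_map, List.map_cons, List.sum_cons, List.map_map]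
    have hzero : (if pChain (toggleOdd queries) 0 = true then (1 : Int) else 0) = 0 := by
      simp [pChain_zero]
    rw [hzero, zero_add, zero_add]
    congr 1
    apply List.map_congr_left
    intro j _
    simp only [Function.comp_apply, Int.toNat_natCast]
    have hb : j + 1 < 2 ^ (j + 2) := by
      have h1 := Nat.lt_two_pow_self (n := j + 2)
      omega
    rw [upWalk_char (toggleOdd queries) (j + 2) (j + 1) 0 hb (Or.inl rfl)]
    simp [Nat.succ_eq_add_one]
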